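-- pv_equiv track=rewrite | github.com/vollmerm/hop-py | cfg_opt.py | _merge_maps
-- ===== SOURCE A (Python) =====
-- from typing import Dict, List, Optional, Set, Tuple
--
-- def _merge_maps(maps: List[Dict[str, str]]) -> Dict[str, str]:
--     if not maps:
--         return {}
--     # Intersection: keep mapping k->v only if all maps have same v for k
--     keys = set(maps[0].keys())
--     for m in maps[1:]:
--         keys &= set(m.keys())
--     out: Dict[str, str] = {}
--     for k in keys:
--         v = maps[0][k]
--         if all(m.get(k) == v for m in maps[1:]):
--             out[k] = v
--     return out
-- ===== SOURCE B (Python) =====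
-- def _merge_maps(maps):
--     counts = {}
--     for m in maps:
--         for kv in m.items():
--             counts[kv] = counts.get(kv, 0) + 1
--     n = len(maps)
--     return {k: v for (k, v), c in counts.items() if c == n}
-- ===== Notes on version B (the rewrite author's own statement) =====
-- stated objective: idiomatic
-- what changed: Replaces A's key-set intersection loop plus per-key all() verification scan with a single tally of every (key,value) pair into one counts dict, then a filtered comprehension keeping pairs whose count equals len(maps).
import Mathlib
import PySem

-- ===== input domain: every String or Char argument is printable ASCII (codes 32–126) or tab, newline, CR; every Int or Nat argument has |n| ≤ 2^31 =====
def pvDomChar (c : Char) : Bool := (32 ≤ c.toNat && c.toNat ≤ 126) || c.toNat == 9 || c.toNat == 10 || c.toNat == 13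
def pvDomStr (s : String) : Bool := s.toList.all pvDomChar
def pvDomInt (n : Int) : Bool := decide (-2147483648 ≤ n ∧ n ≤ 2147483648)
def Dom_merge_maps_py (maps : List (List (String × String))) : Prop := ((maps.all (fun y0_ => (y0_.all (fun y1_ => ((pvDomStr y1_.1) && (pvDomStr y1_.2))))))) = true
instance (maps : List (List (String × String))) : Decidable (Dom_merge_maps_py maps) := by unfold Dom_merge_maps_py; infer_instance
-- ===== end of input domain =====

-- B replaces A's key-set intersection plus per-key all() scan with one (key,value)-pair
-- tally pass and a filtered rebuild — simpler/idiomatic, not claimed faster.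

-- ===== PORT A =====
def merge_maps_py (maps : List (List (String × String))) : List (String × String) :=
  match maps with
  | [] => []
  | m0 :: rest =>
    -- keys = set(maps[0].keys()); for m in maps[1:]: keys &= set(m.keys())
    let keys : PySem.Set String :=
      rest.foldl (fun ks m => PySem.Set.inter ks (PySem.Set.ofList ((PySem.Dict.mk m).keys)))
        (PySem.Set.ofList ((PySem.Dict.mk m0).keys))
    -- for k in keys: v = maps[0][k]; if all(m.get(k) == v for m in maps[1:]): out[k] = v
    -- maps[0][k] cannot raise KeyError: k is drawn from the intersection of all key sets
    let out : PySem.Dict String String :=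
      keys.foldl (fun out k =>
        let v := (PySem.Dict.mk m0).getD k ""
        if rest.all (fun m => (PySem.Dict.mk m).get? k == some v) then out.insert k v else out)
        PySem.Dict.empty
    out.items

-- ===== PORT B =====
def merge_maps_py_alt (maps : List (List (String × String))) : List (String × String) :=
  -- counts[kv] = counts.get(kv, 0) + 1 over every map's items
  let counts : PySem.Dict (String × String) Int :=
    maps.foldl (fun d m => m.foldl (fun d kv => d.insert kv (d.getD kv 0 + 1)) d) PySem.Dict.empty
  let n : Int := maps.length
  -- {k: v for (k, v), c in counts.items() if c == n}
  (counts.items.foldl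
      (fun out p => if p.2 == n then out.insert p.1.1 p.1.2 else out)
      (PySem.Dict.empty : PySem.Dict String String)).items

-- ===== PRECONDITION & SPEC =====
-- Pre_ requires each inner association list to have pairwise-distinct keys: a list with a
-- duplicated key does not represent any Python dict, so A's behaviour is not defined there.
def Pre_merge_maps_py (maps : List (List (String × String))) : Prop :=
  ∀ m ∈ maps, (m.map Prod.fst).Nodup
instance (maps : List (List (String × String))) : Decidable (Pre_merge_maps_py maps) := by
  unfold Pre_merge_maps_py; infer_instance
def pvWitness_merge_maps_py : (List (List (String × String))) :=
  [[("a", "1"), ("b", "2")], [("a", "1"), ("c", "3")]]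

def Spec_merge_maps_py (maps : List (List (String × String))) (out : List (String × String)) : Prop := out = merge_maps_py_alt maps
instance (maps : List (List (String × String))) (out : List (String × String)) : Decidable (Spec_merge_maps_py maps out) := by unfold Spec_merge_maps_py; infer_instance

-- ===== CLAIM (what is proved, stated in full; the proofs are below) =====
def Claim_equal_merge_maps_py : Prop := ∀ (maps : List (List (String × String))), Dom_merge_maps_py maps → Pre_merge_maps_py maps → Spec_merge_maps_py maps (merge_maps_py maps)

-- ===== LEMMAS AND PROOFS =====

-- the common canonical value: the pairs of maps[0] on which every other map agrees
def pvCanon (m0 : List (String × String)) (rest : List (List (String × String))) :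
    List (String × String) :=
  m0.filter (fun kv => rest.all (fun m => (PySem.Dict.mk m).get? kv.1 == some kv.2))

-- a fold that conditionally consumes an element is a fold over the filtered list
theorem pv_foldl_if_filter {α β : Type} (l : List α) (q : α → Bool) (g : β → α → β)
    (init : β) :
    l.foldl (fun acc x => if q x then g acc x else acc) init = (l.filter q).foldl g init := by
  induction l generalizing init with
  | nil => rfl
  | cons h t ih => by_cases hq : q h <;> simp [hq, ih]

theorem pv_foldl_flatten {α β : Type} (L : List (List α)) (f : β → α → β) (init : β) :
    L.flatten.foldl f init = L.foldl (fun a xs => xs.foldl f a) init := by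
  induction L generalizing init with
  | nil => rfl
  | cons h t ih => simp [List.foldl_append, ih]

theorem pv_count_flatten_le {α : Type} [BEq α] [LawfulBEq α] (L : List (List α)) (x : α)
    (h : ∀ m ∈ L, m.count x ≤ 1) : L.flatten.count x ≤ L.length := by
  induction L with
  | nil => simp
  | cons m t ih =>
    have h1 := h m (by simp)
    have h2 := ih (fun m hm => h m (by simp [hm]))
    simp only [List.flatten_cons, List.count_append, List.length_cons]
    omega

theorem pv_count_flatten_eq_length_iff {α : Type} [BEq α] [LawfulBEq α] (L : List (List α)) (x : α)
    (h : ∀ m ∈ L, m.count x ≤ 1) : (L.flatten.count x = L.length) ↔ ∀ m ∈ L, x ∈ m := by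
  induction L with
  | nil => simp
  | cons m t ih =>
    have h1 := h m (by simp)
    have ht : ∀ m' ∈ t, m'.count x ≤ 1 := fun m' hm => h m' (by simp [hm])
    have h2 := pv_count_flatten_le t x ht
    have hmem : x ∈ m ↔ 0 < m.count x := (List.count_pos_iff).symm
    rw [List.flatten_cons, List.count_append]
    constructor
    · intro he
      have hc : m.count x = 1 ∧ t.flatten.count x = t.length := by
        simp only [List.length_cons] at he; omega
      intro m' hm'
      rcases List.mem_cons.mp hm' with rfl | hm'
      · exact hmem.mpr (by omega)
      · exact ((ih ht).mp hc.2) m' hm'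
    · intro hall
      have hm1 : m.count x = 1 := by
        have := hmem.mp (hall m (by simp)); omega
      have := (ih ht).mpr (fun m' hm' => hall m' (by simp [hm']))
      simp only [List.length_cons]; omega

-- membership of a pair in an association list with distinct keys = a successful lookup
theorem pv_mem_iff_get? (m : List (String × String)) (h : (m.map Prod.fst).Nodup)
    (kv : String × String) : kv ∈ m ↔ (PySem.Dict.mk m).get? kv.1 = some kv.2 := by
  constructor
  · intro hm
    exact PySem.Dict.get?_of_mem_items (d := PySem.Dict.mk m) hm h
  · intro hg
    exact PySem.Dict.mem_items_of_get?_eq_some (d := PySem.Dict.mk m) hg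

-- a chain of set intersections is one filter
theorem pv_foldl_inter {γ : Type} (rest : List γ) (f : γ → List String) (s : List String) :
    rest.foldl (fun ks m => PySem.Set.inter ks (f m)) s
      = s.filter (fun k => rest.all (fun m => (f m).contains k)) := by
  induction rest generalizing s with
  | nil => simp
  | cons h t ih =>
    show t.foldl _ (PySem.Set.inter s (f h)) = _
    rw [ih]
    show (s.filter fun x => (f h).contains x).filter _ = _
    rw [List.filter_filter]
    simp [List.all_cons, Bool.and_comm]

-- rebuild of a key list into the pairs of m0 (keys distinct)
theorem pv_map_getD (m0 : List (String × String)) (h : (m0.map Prod.fst).Nodup)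
    (c : String → Bool) :
    ((m0.map Prod.fst).filter c).map (fun k => (k, (PySem.Dict.mk m0).getD k ""))
      = m0.filter (fun kv => c kv.1) := by
  rw [List.filter_map]
  rw [List.map_map]
  have hc : (c ∘ Prod.fst) = fun kv : String × String => c kv.1 := rfl
  rw [hc]
  have : ∀ kv ∈ m0.filter (fun kv => c kv.1),
      ((fun k => (k, (PySem.Dict.mk m0).getD k "")) ∘ Prod.fst) kv = kv := by
    intro kv hkv
    have hm : kv ∈ m0 := List.mem_of_mem_filter hkv
    have := PySem.Dict.getD_of_mem_items (d := PySem.Dict.mk m0) (d0 := "") hm h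
    simp [Function.comp, this]
  rw [List.map_congr_left this, List.map_id']

theorem pv_A_canon (m0 : List (String × String)) (rest : List (List (String × String)))
    (h0 : (m0.map Prod.fst).Nodup) (_hrest : ∀ m ∈ rest, (m.map Prod.fst).Nodup) :
    merge_maps_py (m0 :: rest) = pvCanon m0 rest := by
  have hk0 : PySem.Set.ofList ((PySem.Dict.mk m0).keys) = m0.map Prod.fst := by
    rw [show (PySem.Dict.mk m0).keys = m0.map Prod.fst from rfl]
    exact PySem.Set.ofList_eq_self_of_nodup _ h0
  show (List.foldl
      (fun out k =>
        if rest.all (fun m => (PySem.Dict.mk m).get? k == some ((PySem.Dict.mk m0).getD k "")) then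
          out.insert k ((PySem.Dict.mk m0).getD k "")
        else out)
      PySem.Dict.empty
      (rest.foldl (fun ks m => PySem.Set.inter ks (PySem.Set.ofList ((PySem.Dict.mk m).keys)))
        (PySem.Set.ofList ((PySem.Dict.mk m0).keys)))).items = pvCanon m0 rest
  rw [pv_foldl_inter rest (fun m => PySem.Set.ofList ((PySem.Dict.mk m).keys)), hk0,
      pv_foldl_if_filter, List.filter_filter]
  rw [PySem.Dict.items_foldl_insert_fresh _ (fun a => a) (fun k => (PySem.Dict.mk m0).getD k "")
        PySem.Dict.empty (fun a _ => rfl) (by rw [List.map_id']; exact h0.filter _)]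
  rw [show (PySem.Dict.empty : PySem.Dict String String).items = [] from rfl, List.nil_append,
      pv_map_getD m0 h0]
  apply List.filter_congr
  intro kv hkv
  have hg : (PySem.Dict.mk m0).getD kv.1 "" = kv.2 :=
    PySem.Dict.getD_of_mem_items (d := PySem.Dict.mk m0) hkv h0 ""
  rw [hg]
  unfold pvCanon at *
  cases hall : rest.all (fun m => (PySem.Dict.mk m).get? kv.1 == some kv.2) with
  | false => simp
  | true =>
    simp only [Bool.true_and]
    rw [List.all_eq_true] at hall
    rw [List.all_eq_true]
    intro m hm
    have hget : (PySem.Dict.mk m).get? kv.1 = some kv.2 := by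
      have := hall m hm; simpa using this
    have hkmem : kv.1 ∈ (PySem.Dict.mk m).keys :=
      PySem.Dict.mem_keys_of_mem_items _ (PySem.Dict.mem_items_of_get?_eq_some _ hget)
    simpa [List.contains_iff_mem, PySem.Set.mem_ofList] using hkmem

theorem pv_B_canon (m0 : List (String × String)) (rest : List (List (String × String)))
    (h0 : (m0.map Prod.fst).Nodup) (hrest : ∀ m ∈ rest, (m.map Prod.fst).Nodup) :
    merge_maps_py_alt (m0 :: rest) = pvCanon m0 rest := by
  have hmaps : ∀ m ∈ m0 :: rest, (List.map Prod.fst m).Nodup := by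
    intro m hm
    rcases List.mem_cons.mp hm with rfl | hm
    · exact h0
    · exact hrest m hm
  have hnd0 : m0.Nodup := List.Nodup.of_map Prod.fst h0
  have hcounts : (m0 :: rest).foldl
      (fun d m => m.foldl (fun d kv => d.insert kv (d.getD kv 0 + 1)) d) PySem.Dict.empty
      = PySem.Dict.counter ((m0 :: rest).flatten) := by
    rw [← PySem.Dict.foldl_insert_getD_add_one_eq_counter, pv_foldl_flatten]
  show ((((m0 :: rest).foldl
      (fun d m => m.foldl (fun d kv => d.insert kv (d.getD kv 0 + 1)) d)
      PySem.Dict.empty).items).foldl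
      (fun out p => if p.2 == (((m0 :: rest).length : Nat) : Int) then out.insert p.1.1 p.1.2 else out)
      PySem.Dict.empty).items = pvCanon m0 rest
  rw [hcounts, PySem.Dict.items_counter, pv_foldl_if_filter, List.filter_map]
  have hcomp : ((fun p : (String × String) × Int => p.2 == (((m0 :: rest).length : Nat) : Int)) ∘
      (fun k => (k, ((((m0 :: rest).flatten).count k : Nat) : Int))))
      = fun kv => (((((m0 :: rest).flatten).count kv : Nat) : Int) == (((m0 :: rest).length : Nat) : Int)) := rfl
  rw [hcomp, List.foldl_map]
  have hcount : ∀ kv : String × String,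
      (((((m0 :: rest).flatten).count kv : Nat) : Int) == (((m0 :: rest).length : Nat) : Int)) = true
        ↔ ∀ m ∈ m0 :: rest, kv ∈ m := by
    intro kv
    rw [beq_iff_eq, Nat.cast_inj]
    exact pv_count_flatten_eq_length_iff _ kv
      (fun m hm => List.nodup_iff_count_le_one.mp (List.Nodup.of_map Prod.fst (hmaps m hm)) kv)
  have hS : (PySem.Set.ofList ((m0 :: rest).flatten)).filter
        (fun kv => (((((m0 :: rest).flatten).count kv : Nat) : Int) == (((m0 :: rest).length : Nat) : Int)))
      = pvCanon m0 rest := by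
    have hofl : PySem.Set.ofList ((m0 :: rest).flatten)
        = m0 ++ (PySem.Set.ofList rest.flatten).filter (fun y => !(PySem.Set.contains m0 y)) := by
      rw [List.flatten_cons, PySem.Set.ofList_append, PySem.Set.ofList_eq_self_of_nodup _ hnd0,
          PySem.Set.update_eq_append_filter]
    rw [hofl, List.filter_append]
    have h2 : ((PySem.Set.ofList rest.flatten).filter (fun y => !(PySem.Set.contains m0 y))).filter
        (fun kv => (((((m0 :: rest).flatten).count kv : Nat) : Int) == (((m0 :: rest).length : Nat) : Int))) = [] := by
      rw [List.filter_eq_nil_iff]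
      intro kv hkv hp
      have hnotm0 : kv ∉ m0 := by
        have := List.of_mem_filter hkv
        simpa using this
      exact hnotm0 ((hcount kv).mp hp m0 (by simp))
    rw [h2, List.append_nil]
    apply List.filter_congr
    intro kv hkv
    have hiff : (rest.all (fun m => (PySem.Dict.mk m).get? kv.1 == some kv.2)) = true
        ↔ ∀ m ∈ rest, kv ∈ m := by
      rw [List.all_eq_true]
      constructor
      · intro h m hm
        exact (pv_mem_iff_get? m (hrest m hm) kv).mpr (by simpa using h m hm)
      · intro h m hm
        simpa using (pv_mem_iff_get? m (hrest m hm) kv).mp (h m hm)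
    have : (((((m0 :: rest).flatten).count kv : Nat) : Int) == (((m0 :: rest).length : Nat) : Int)) = true
        ↔ (rest.all (fun m => (PySem.Dict.mk m).get? kv.1 == some kv.2)) = true := by
      rw [hcount kv, hiff]
      constructor
      · intro h m hm
        exact h m (by simp [hm])
      · intro h m hm
        rcases List.mem_cons.mp hm with rfl | hm
        · exact hkv
        · exact h m hm
    exact Bool.coe_iff_coe.mp this
  rw [hS]
  show (List.foldl (fun d (a : String × String) => d.insert a.1 a.2) PySem.Dict.empty
      (pvCanon m0 rest)).items = pvCanon m0 rest
  unfold pvCanon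
  rw [PySem.Dict.items_foldl_insert_fresh _ Prod.fst Prod.snd PySem.Dict.empty
        (fun a _ => rfl)
        (List.Nodup.sublist (List.Sublist.map Prod.fst (List.filter_sublist (l := m0))) h0)]
  rw [show (PySem.Dict.empty : PySem.Dict String String).items = [] from rfl, List.nil_append]
  have hid : (fun a : String × String => (a.1, a.2)) = fun a => a := rfl
  rw [show (fun a : String × String => (Prod.fst a, Prod.snd a)) = fun a => a from rfl, List.map_id']

-- ===== VERDICT (by name: the statement is the Claim_ definition above) =====
theorem merge_maps_py_spec : Claim_equal_merge_maps_py := by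
  intro maps _ hpre
  unfold Spec_merge_maps_py
  match maps with
  | [] => rfl
  | m0 :: rest =>
    rw [pv_A_canon m0 rest (hpre m0 (by simp)) (fun m hm => hpre m (by simp [hm])),
        pv_B_canon m0 rest (hpre m0 (by simp)) (fun m hm => hpre m (by simp [hm]))]
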